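-- pv_equiv track=rewrite | github.com/Daniel-B-Oliveira/Python-Udemy-Curso | modulo_matrizes.py | formar_matriz_3d
-- ===== SOURCE A (Python) =====
-- def gerar_numeros(i=0,f=1,c=1):
--     numeros = list()
--
--     for n in range(i,f,c):
--         numeros.append(n)
--
--     return numeros
--
-- def formar_matriz_3d(tamanhho=0):
--
--     numeros_list = gerar_numeros(f=tamanhho**3)
--
--     matrizes_list = list()
--     camadas_list = list()
--     linhas_list = list()
--     colunas_list = list()
--
--     for c1 in range(0, tamanhho):
--         for c2 in range(0, tamanhho):
--             for c3 in range(0, tamanhho):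
--                 colunas_list.append(numeros_list[0])
--                 numeros_list.remove(numeros_list[0])
--             linhas_list.append(colunas_list[:])
--             colunas_list.clear()
--         camadas_list.append(linhas_list[:])
--         linhas_list.clear()
--     matrizes_list = camadas_list[:]
--
--     return matrizes_list
-- ===== SOURCE B (Python) =====
-- def formar_matriz_3d(tamanhho=0):
--     # Build the flat number list once, then reshape it by slicing:
--     # cut into n*n rows of length n, then group every n rows into a layer.
--     n = tamanhho
--     if n <= 0:
--         return []
--     nums = list(range(n ** 3))
--     rows = [nums[k * n:(k + 1) * n] for k in range(n * n)]
--     return [rows[j * n:(j + 1) * n] for j in range(n)]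
-- ===== Notes on version B (the rewrite author's own statement) =====
-- stated objective: alternative
-- what changed: Replaced the three nested counting loops that pop the head of the flat list one element at a time (each remove shifts the whole remainder) by a build-then-partition scheme: build the flat range once and slice it into rows, then slice the row list into layers.
import Mathlib
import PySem

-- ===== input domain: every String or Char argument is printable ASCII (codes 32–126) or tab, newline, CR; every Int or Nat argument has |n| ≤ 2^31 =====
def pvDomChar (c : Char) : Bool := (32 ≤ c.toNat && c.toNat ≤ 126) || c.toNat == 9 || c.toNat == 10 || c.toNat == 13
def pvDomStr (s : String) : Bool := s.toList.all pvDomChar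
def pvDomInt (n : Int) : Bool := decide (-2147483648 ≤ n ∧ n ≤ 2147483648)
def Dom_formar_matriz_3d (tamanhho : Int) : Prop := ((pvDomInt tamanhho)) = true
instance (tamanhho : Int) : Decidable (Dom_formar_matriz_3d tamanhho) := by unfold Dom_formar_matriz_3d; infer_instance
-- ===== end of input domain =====

-- B replaces A's triple counting loop with repeated head removal by building the flat
-- range once and slicing it into rows, then grouping rows into layers.

-- ===== PORT A =====
def gerar_numeros (i f c : Int) : List Int :=
  (PySem.List.pyRange i f c).foldl (fun numeros n => numeros ++ [n]) []

-- innermost body: colunas.append(numeros[0]); numeros.remove(numeros[0]).  numeros[0] is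
-- the head, and remove deletes its first occurrence, which is index 0; numeros is never
-- empty when Python reads it (n^3 elements for n^3 reads), so headD 0 is exact on every
-- reached state.
def pvStepC3 (u : List Int × List Int) (_c3 : Int) : List Int × List Int :=
  (u.1.tail, u.2 ++ [u.1.headD 0])

-- middle body: the c3 loop, then linhas.append(colunas[:]); colunas.clear()
def pvStepC2 (q : List Int) (t : List Int × List (List Int)) (_c2 : Int) :
    List Int × List (List Int) :=
  let t2 := q.foldl pvStepC3 (t.1, ([] : List Int))
  (t2.1, t.2 ++ [t2.2])

-- outer body: the c2 loop, then camadas.append(linhas[:]); linhas.clear()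
def pvStepC1 (q : List Int) (s : List Int × List (List (List Int))) (_c1 : Int) :
    List Int × List (List (List Int)) :=
  let s2 := q.foldl (pvStepC2 q) (s.1, ([] : List (List Int)))
  (s2.1, s.2 ++ [s2.2])

def formar_matriz_3d (tamanhho : Int) : List (List (List Int)) :=
  ((PySem.List.pyRange 0 tamanhho 1).foldl
    (pvStepC1 (PySem.List.pyRange 0 tamanhho 1))
    (gerar_numeros 0 (tamanhho ^ 3) 1, ([] : List (List (List Int))))).2

-- ===== PORT B =====
-- rows = [nums[k*n:(k+1)*n] for k in range(n*n)]
def pvRows (tamanhho : Int) : List (List Int) :=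
  (PySem.List.pyRange 0 (tamanhho * tamanhho) 1).map
    (fun k => PySem.List.slice (PySem.List.pyRange 0 (tamanhho ^ 3) 1)
      (some (k * tamanhho)) (some ((k + 1) * tamanhho)))

def formar_matriz_3d_alt (tamanhho : Int) : List (List (List Int)) :=
  if tamanhho ≤ 0 then []
  else
    (PySem.List.pyRange 0 tamanhho 1).map
      (fun j => PySem.List.slice (pvRows tamanhho)
        (some (j * tamanhho)) (some ((j + 1) * tamanhho)))

-- ===== PRECONDITION & SPEC =====
def Spec_formar_matriz_3d (tamanhho : Int) (out : List (List (List Int))) : Prop := out = formar_matriz_3d_alt tamanhho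
instance (tamanhho : Int) (out : List (List (List Int))) : Decidable (Spec_formar_matriz_3d tamanhho out) := by unfold Spec_formar_matriz_3d; infer_instance

-- ===== CLAIM (what is proved, stated in full; the proofs are below) =====
def Claim_equal_formar_matriz_3d : Prop := ∀ (tamanhho : Int), Dom_formar_matriz_3d tamanhho → Spec_formar_matriz_3d tamanhho (formar_matriz_3d tamanhho)

-- ===== LEMMAS AND PROOFS =====

/-- The first `k` blocks of `sz` consecutive elements of `L`. -/
def pvChunks {α : Type} (sz : Nat) : Nat → List α → List (List α)
  | 0, _ => []
  | k+1, L => L.take sz :: pvChunks sz k (L.drop sz)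

/-- `k` layers of `N` rows of `N` elements each, cut off the front of `L`. -/
def pvLayers (N : Nat) : Nat → List Int → List (List (List Int))
  | 0, _ => []
  | k+1, L => pvChunks N N L :: pvLayers N k (L.drop (N*N))

lemma pvChunks_length {α : Type} (sz k : Nat) (L : List α) :
    (pvChunks sz k L).length = k := by
  induction k generalizing L with
  | zero => rfl
  | succ k ih => simp [pvChunks, ih]

lemma pvChunks_add {α : Type} (sz a b : Nat) (L : List α) :
    pvChunks sz (a + b) L = pvChunks sz a L ++ pvChunks sz b (L.drop (a * sz)) := by
  induction a generalizing L with
  | zero => simp [pvChunks]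
  | succ a ih =>
      have h : a + 1 + b = (a + b) + 1 := by omega
      rw [h]
      simp only [pvChunks, ih, List.drop_drop, List.cons_append]
      congr 2
      simp only [Nat.succ_mul]
      ring_nf

lemma pvChunks_range {α : Type} (N m : Nat) (L : List α) :
    (List.range m).map (fun a => (L.drop (a * N)).take N) = pvChunks N m L := by
  induction m generalizing L with
  | zero => rfl
  | succ m ih =>
      rw [List.range_succ_eq_map]
      simp only [List.map_cons, List.map_map, pvChunks, Nat.zero_mul, List.drop_zero]
      congr 1
      rw [← ih (L.drop N)]
      apply List.map_congr_left
      intro a _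
      simp only [Function.comp, List.drop_drop]
      congr 2
      simp only [Nat.succ_mul]
      ring

lemma pvLayers_eq (N : Nat) : ∀ (k : Nat) (L : List Int),
    pvLayers N k L = pvChunks N k (pvChunks N (k * N) L) := by
  intro k
  induction k with
  | zero => intro L; rfl
  | succ k ih =>
      intro L
      have hsplit : (k + 1) * N = N + k * N := by ring
      have hlen : (pvChunks N N L).length = N := pvChunks_length N N L
      rw [pvLayers, hsplit, pvChunks_add N N (k * N) L]
      show _ = pvChunks N (k + 1) _
      rw [pvChunks, List.take_left' hlen, List.drop_left' hlen, ih]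

lemma pvInner (q : List Int) : ∀ (nums cols : List Int), q.length ≤ nums.length →
    q.foldl pvStepC3 (nums, cols) = (nums.drop q.length, cols ++ nums.take q.length) := by
  induction q with
  | nil => intro nums cols _; simp
  | cons a q ih =>
      intro nums cols h
      cases nums with
      | nil => simp at h
      | cons b t =>
          simp only [List.foldl_cons, pvStepC3, List.tail_cons, List.headD_cons]
          rw [ih t (cols ++ [b]) (by simpa using h)]
          simp

lemma pvMiddle (q r : List Int) : ∀ (nums : List Int) (lin : List (List Int)),
    r.length * q.length ≤ nums.length →
    r.foldl (pvStepC2 q) (nums, lin)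
      = (nums.drop (r.length * q.length), lin ++ pvChunks q.length r.length nums) := by
  induction r with
  | nil => intro nums lin _; simp [pvChunks]
  | cons a r ih =>
      intro nums lin h
      simp only [List.length_cons] at h ⊢
      have hs : (r.length + 1) * q.length = q.length + r.length * q.length := by ring
      simp only [List.foldl_cons, pvStepC2]
      rw [pvInner q nums [] (by omega)]
      simp only [List.nil_append]
      rw [ih (nums.drop q.length) (lin ++ [nums.take q.length])
        (by simp only [List.length_drop]; omega)]
      have hdrop : (nums.drop q.length).drop (r.length * q.length)
          = nums.drop ((r.length + 1) * q.length) := by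
        rw [List.drop_drop]; congr 1; omega
      have hchunk : pvChunks q.length (r.length + 1) nums
          = nums.take q.length :: pvChunks q.length r.length (nums.drop q.length) := rfl
      rw [hdrop, hchunk]
      simp

lemma pvOuter (q r : List Int) : ∀ (nums : List Int) (cam : List (List (List Int))),
    r.length * (q.length * q.length) ≤ nums.length →
    r.foldl (pvStepC1 q) (nums, cam)
      = (nums.drop (r.length * (q.length * q.length)),
         cam ++ pvLayers q.length r.length nums) := by
  induction r with
  | nil => intro nums cam _; simp [pvLayers]
  | cons a r ih =>
      intro nums cam h
      simp only [List.length_cons] at h ⊢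
      have hs : (r.length + 1) * (q.length * q.length)
          = q.length * q.length + r.length * (q.length * q.length) := by ring
      simp only [List.foldl_cons, pvStepC1]
      rw [pvMiddle q q nums [] (by omega)]
      simp only [List.nil_append]
      rw [ih (nums.drop (q.length * q.length)) (cam ++ [pvChunks q.length q.length nums])
        (by simp only [List.length_drop]; omega)]
      have hdrop : (nums.drop (q.length * q.length)).drop (r.length * (q.length * q.length))
          = nums.drop ((r.length + 1) * (q.length * q.length)) := by
        rw [List.drop_drop]; congr 1; omega
      have hlayer : pvLayers q.length (r.length + 1) nums
          = pvChunks q.length q.length nums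
              :: pvLayers q.length r.length (nums.drop (q.length * q.length)) := rfl
      rw [hdrop, hlayer]
      simp

lemma pvSliceMap {α : Type} (N m : Nat) (L : List α) :
    (PySem.List.pyRange 0 (m : Int) 1).map
      (fun k => PySem.List.slice L (some (k * (N : Int))) (some ((k + 1) * (N : Int))))
      = pvChunks N m L := by
  rw [PySem.List.pyRange_one]
  have h0 : ((m : Int) - 0).toNat = m := by omega
  rw [h0, List.map_map, ← pvChunks_range N m L]
  apply List.map_congr_left
  intro a _
  simp only [Function.comp]
  have h1 : ((0 : Int) + (a : Int)) * (N : Int) = ((a * N : Nat) : Int) := by push_cast; ring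
  have h2 : ((0 : Int) + (a : Int) + 1) * (N : Int) = (((a + 1) * N : Nat) : Int) := by
    push_cast; ring
  rw [h1, h2, PySem.List.slice_natCast]
  have hs : (a + 1) * N = a * N + N := by ring
  congr 1
  omega

lemma pvA_neg (t : Int) (h : t ≤ 0) : formar_matriz_3d t = [] := by
  unfold formar_matriz_3d
  rw [PySem.List.pyRange_one_eq_nil h]
  rfl

lemma pvB_neg (t : Int) (h : t ≤ 0) : formar_matriz_3d_alt t = [] := by
  unfold formar_matriz_3d_alt
  rw [if_pos h]

lemma pvFlat (t : Int) : gerar_numeros 0 (t ^ 3) 1 = PySem.List.pyRange 0 (t ^ 3) 1 := by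
  unfold gerar_numeros
  rw [PySem.List.foldl_append_singleton]
  simp

lemma pvA_nat (N : Nat) :
    formar_matriz_3d (N : Int) = pvLayers N N (PySem.List.pyRange 0 ((N : Int) ^ 3) 1) := by
  unfold formar_matriz_3d
  rw [pvFlat]
  have hql : (PySem.List.pyRange 0 (N : Int) 1).length = N := by
    rw [PySem.List.length_pyRange_one]; omega
  have hflatlen : (PySem.List.pyRange 0 ((N : Int) ^ 3) 1).length = N * (N * N) := by
    rw [PySem.List.length_pyRange_one]
    have : ((N : Int) ^ 3 - 0) = ((N * (N * N) : Nat) : Int) := by push_cast; ring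
    rw [this]; omega
  rw [pvOuter (PySem.List.pyRange 0 (N : Int) 1) (PySem.List.pyRange 0 (N : Int) 1)
    _ [] (by rw [hql, hflatlen])]
  simp [hql]

lemma pvRows_nat (N : Nat) :
    pvRows (N : Int) = pvChunks N (N * N) (PySem.List.pyRange 0 ((N : Int) ^ 3) 1) := by
  unfold pvRows
  have hnn : (N : Int) * (N : Int) = ((N * N : Nat) : Int) := by push_cast; ring
  rw [hnn, pvSliceMap N (N * N)]

lemma pvB_nat (N : Nat) (h : 0 < N) :
    formar_matriz_3d_alt (N : Int)
      = pvChunks N N (pvChunks N (N * N) (PySem.List.pyRange 0 ((N : Int) ^ 3) 1)) := by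
  unfold formar_matriz_3d_alt
  rw [if_neg (by omega), pvSliceMap N N (pvRows (N : Int)), pvRows_nat]

-- ===== VERDICT (by name: the statement is the Claim_ definition above) =====
theorem formar_matriz_3d_spec : Claim_equal_formar_matriz_3d := by
  intro t _
  unfold Spec_formar_matriz_3d
  rcases (show t ≤ 0 ∨ 0 < t by omega) with h | h
  · rw [pvA_neg t h, pvB_neg t h]
  · obtain ⟨N, rfl⟩ : ∃ N : Nat, t = (N : Int) := ⟨t.toNat, by omega⟩
    rw [pvA_nat, pvB_nat N (by exact_mod_cast h), pvLayers_eq]
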